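-- pv_equiv track=rewrite | github.com/kiharalab/DAQ-Refine | step_1.py | trim_a3m
-- ===== SOURCE A (Python) =====
-- def trim_a3m(a3m,daq,good):
--
--     out=[]
--     for ith in range(len(a3m)):
--         name,seq = a3m[ith]
--         new_seq=''
--         if ith == 0:#query
--             new_seq = seq
--         else:
--             pos=0
--             for aa in seq:
--                 if aa == aa.lower() and aa != '-':
--                     continue
--                 pos = pos + 1
--                 if pos in daq: #selected bad regions or missing regions
--                     new_seq = new_seq + aa
--                 elif not pos in good:
--                     new_seq = new_seq + aa
--                 elif aa == aa.upper():
--                     new_seq = new_seq + '-'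
--         out.append([name,new_seq])
--     return out
-- ===== SOURCE B (Python) =====
-- def trim_a3m(a3m, daq, good):
--     if not a3m:
--         return []
--     name0, seq0 = a3m[0]
--     out = [[name0, seq0]]
--     for name, seq in a3m[1:]:
--         # pass 1: drop lowercase insertion characters, keeping the match columns
--         chars = [c for c in seq if c == '-' or c != c.lower()]
--         # pass 2: walk the position list, overwriting trimmed columns in place
--         for p in good:
--             if p not in daq and 1 <= p <= len(chars):
--                 chars[p - 1] = '-'
--         out.append([name, ''.join(chars)])
--     return out
-- ===== Notes on version B (the rewrite author's own statement) =====
-- stated objective: alternative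
-- what changed: B replaces A's single character walk with a position counter and three-way membership branch by two staged passes per row: first filter out lowercase insertions, then iterate over the good position list assigning '-' directly into the char array (daq-precedence checked per position), joining at the end; the query row is handled by head/tail split instead of an index test.
import Mathlib
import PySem

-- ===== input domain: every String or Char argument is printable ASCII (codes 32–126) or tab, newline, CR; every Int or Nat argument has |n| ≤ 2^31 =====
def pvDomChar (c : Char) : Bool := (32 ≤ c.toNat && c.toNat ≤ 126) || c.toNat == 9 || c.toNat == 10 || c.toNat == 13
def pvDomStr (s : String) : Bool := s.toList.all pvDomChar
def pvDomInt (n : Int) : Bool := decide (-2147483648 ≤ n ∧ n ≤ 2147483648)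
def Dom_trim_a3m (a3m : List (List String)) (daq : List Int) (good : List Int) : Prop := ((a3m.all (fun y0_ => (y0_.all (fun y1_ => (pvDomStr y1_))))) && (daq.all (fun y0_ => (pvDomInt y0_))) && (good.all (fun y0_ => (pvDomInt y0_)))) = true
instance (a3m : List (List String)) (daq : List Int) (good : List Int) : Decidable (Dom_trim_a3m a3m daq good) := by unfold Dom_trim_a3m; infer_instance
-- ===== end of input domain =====

-- B trims each non-query row in two staged passes (filter insertions, then assign '-' into the
-- char array while iterating the good position list) instead of A's counted character walk
-- with a three-way membership branch (objective: alternative; return value only).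

-- ===== PORT A =====
-- A's inner character loop: state (pos, accumulated chars of new_seq)
def pvInnerA (daq good : List Int) (st : Int × List Char) (aa : Char) : Int × List Char :=
  if aa = PySem.Chars.lowerChar aa ∧ aa ≠ '-' then st
  else
    let pos := st.1 + 1
    if pos ∈ daq then (pos, st.2 ++ [aa])
    else if ¬ pos ∈ good then (pos, st.2 ++ [aa])
    else if aa = PySem.Chars.upperChar aa then (pos, st.2 ++ ['-'])
    else (pos, st.2)

def trim_a3m (a3m : List (List String)) (daq : List Int) (good : List Int) : List (List String) :=
  (a3m.zipIdx).foldl (fun out rowith =>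
    match rowith.1 with
    | [name, seq] =>
      let new_seq : String :=
        if rowith.2 = 0 then seq
        else String.ofList ((seq.toList.foldl (pvInnerA daq good) ((0 : Int), ([] : List Char))).2)
      out ++ [[name, new_seq]]
    | _ => out) -- Python raises ValueError unpacking a row whose length ≠ 2; excluded by Pre_
    []

-- ===== PORT B =====
-- B's pass-1 filter predicate: c == '-' or c != c.lower()
def pvKeptB (c : Char) : Bool := c == '-' || !(c == PySem.Chars.lowerChar c)

-- B's pass-2 body: if p not in daq and 1 <= p <= len(chars): chars[p-1] = '-'
def pvAssign (daq : List Int) (l : List Char) (p : Int) : List Char :=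
  if p ∉ daq ∧ 1 ≤ p ∧ p ≤ l.length then l.set (p - 1).toNat '-' else l

-- 'name, seq = row': none = Python's ValueError on a row of length ≠ 2 (excluded by Pre_)
def pvRow2? (row : List String) : Option (String × String) :=
  if h : row.length = 2 then some (row[0]'(by omega), row[1]'(by omega)) else none

def pvTrimRowB (daq good : List Int) (row : List String) : List String :=
  (pvRow2? row).elim []
    (fun ns => [ns.1, String.ofList (good.foldl (pvAssign daq) (ns.2.toList.filter pvKeptB))])

def trim_a3m_alt (a3m : List (List String)) (daq : List Int) (good : List Int) : List (List String) :=
  if a3m.isEmpty then []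
  else ((pvRow2? a3m.headI).elim [] (fun ns => [ns.1, ns.2])) :: (a3m.tail.map (pvTrimRowB daq good))

-- ===== PRECONDITION & SPEC =====
-- Pre_ excludes exactly the inputs where Python A raises ValueError: a row of a3m whose length ≠ 2.
def Pre_trim_a3m (a3m : List (List String)) (daq : List Int) (good : List Int) : Prop :=
  ∀ row ∈ a3m, row.length = 2
instance (a3m : List (List String)) (daq : List Int) (good : List Int) : Decidable (Pre_trim_a3m a3m daq good) := by unfold Pre_trim_a3m; infer_instance
def pvWitness_trim_a3m : List (List String) × List Int × List Int :=
  ([["q", "MK-V"], ["s1", "Ma-KV"]], [1], [2, 3])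

def Spec_trim_a3m (a3m : List (List String)) (daq : List Int) (good : List Int) (out : List (List String)) : Prop := out = trim_a3m_alt a3m daq good
instance (a3m : List (List String)) (daq : List Int) (good : List Int) (out : List (List String)) : Decidable (Spec_trim_a3m a3m daq good out) := by unfold Spec_trim_a3m; infer_instance

-- ===== CLAIM (what is proved, stated in full; the proofs are below) =====
def Claim_equal_trim_a3m : Prop := ∀ (a3m : List (List String)) (daq : List Int) (good : List Int), Dom_trim_a3m a3m daq good → Pre_trim_a3m a3m daq good → Spec_trim_a3m a3m daq good (trim_a3m a3m daq good)

-- ===== LEMMAS AND PROOFS =====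

-- rendered sequence: the character A emits for the column at 1-based position n+1, n+2, …
def pvRender (daq good : List Int) (n : Int) : List Char → List Char
  | [] => []
  | c :: cs => (if (n + 1) ∈ good ∧ (n + 1) ∉ daq then '-' else c) :: pvRender daq good (n + 1) cs

-- a character that is not fixed by lowerChar is an uppercase letter, hence fixed by upperChar
lemma pv_upper_fix (c : Char) (h : c ≠ PySem.Chars.lowerChar c) : c = PySem.Chars.upperChar c := by
  by_cases hu : PySem.Chars.isupper c = true
  · have hAZ : 'A' ≤ c ∧ c ≤ 'Z' := by
      unfold PySem.Chars.isupper at hu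
      simpa using hu
    have hlow : PySem.Chars.islower c = false := by
      unfold PySem.Chars.islower
      have : ¬ 'a' ≤ c := fun ha => absurd (le_trans ha hAZ.2) (by decide)
      simp [this]
    simp [PySem.Chars.upperChar, hlow]
  · exact absurd (by simp [PySem.Chars.lowerChar, hu]) h

-- A's counted walk over a sequence = pass-1 filter followed by rendering each kept column
lemma pv_fold_A (daq good : List Int) (cs : List Char) (n : Int) (acc : List Char) :
    cs.foldl (pvInnerA daq good) (n, acc) =
      (n + (cs.filter pvKeptB).length, acc ++ pvRender daq good n (cs.filter pvKeptB)) := by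
  induction cs generalizing n acc with
  | nil => simp only [List.foldl_nil, List.filter_nil, pvRender, List.length_nil,
      Nat.cast_zero, add_zero, List.append_nil]
  | cons c cs ih =>
    by_cases h : c = PySem.Chars.lowerChar c ∧ c ≠ '-'
    · have hk : pvKeptB c = false := by
        have hc1 : (c == PySem.Chars.lowerChar c) = true := beq_iff_eq.mpr h.1
        have hc2 : (c == '-') = false := beq_eq_false_iff_ne.mpr h.2
        simp [pvKeptB, hc1, hc2]
      simp only [List.foldl_cons, pvInnerA, if_pos h, List.filter_cons, hk, Bool.false_eq_true]
      exact ih n acc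
    · have hk : pvKeptB c = true := by
        by_cases hc : c = '-'
        · simp [pvKeptB, hc]
        · have : ¬ c = PySem.Chars.lowerChar c := fun he => h ⟨he, hc⟩
          simp [pvKeptB, this, hc]
      have hemit : pvInnerA daq good (n, acc) c =
          (n + 1, acc ++ [if (n + 1) ∈ good ∧ (n + 1) ∉ daq then '-' else c]) := by
        have hup : c = PySem.Chars.upperChar c := by
          by_cases hc : c = '-'
          · rw [hc]; decide
          · exact pv_upper_fix c (fun he => h ⟨he, hc⟩)
        unfold pvInnerA
        rw [if_neg h]
        by_cases hd : (n + 1) ∈ daq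
        · simp [hd]
        · by_cases hg : (n + 1) ∈ good
          · simp [hd, hg, ← hup]
          · simp [hd, hg]
      simp only [List.foldl_cons, hemit, List.filter_cons, hk]
      rw [ih (n + 1) _]
      simp only [List.append_assoc, List.singleton_append, Prod.mk.injEq]
      constructor
      · push_cast [List.length_cons]; ring
      · rfl

-- pass-2 assignment loop preserves length
lemma pv_assign_len (daq good : List Int) (l : List Char) :
    (good.foldl (pvAssign daq) l).length = l.length := by
  induction good generalizing l with
  | nil => rfl
  | cons p ps ih =>
    rw [List.foldl_cons, ih]
    unfold pvAssign
    split_ifs <;> simp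

-- pass-2 assignment loop, elementwise: position i+1 is blanked iff it is in good and not in daq
lemma pv_assign_get (daq good : List Int) (l : List Char) (i : Nat) (hi : i < l.length) :
    (good.foldl (pvAssign daq) l)[i]'(by rw [pv_assign_len]; exact hi) =
      if ((i : Int) + 1) ∈ good ∧ ((i : Int) + 1) ∉ daq then '-' else l[i] := by
  induction good generalizing l with
  | nil => simp
  | cons p ps ih =>
    have hlen : (pvAssign daq l p).length = l.length := by
      unfold pvAssign; split_ifs <;> simp
    have hi' : i < (pvAssign daq l p).length := by rw [hlen]; exact hi
    have hget : (pvAssign daq l p)[i]'hi' =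
        if p = (i : Int) + 1 ∧ p ∉ daq then '-' else l[i]'hi := by
      by_cases hc : p ∉ daq ∧ 1 ≤ p ∧ p ≤ l.length
      · have ha : pvAssign daq l p = l.set (p - 1).toNat '-' := by
          unfold pvAssign; rw [if_pos hc]
        rw [List.getElem_of_eq ha hi']
        by_cases hp : p = (i : Int) + 1
        · have ht : p.toNat - 1 = i := by omega
          have hd : ((i : Int) + 1) ∉ daq := hp ▸ hc.1
          simp [hp, hd]
        · have ht : p.toNat - 1 ≠ i := by omega
          simp [ht, hp]
      · have ha : pvAssign daq l p = l := by
          unfold pvAssign; rw [if_neg hc]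
        rw [List.getElem_of_eq ha hi']
        have hx : ¬ (p = (i : Int) + 1 ∧ p ∉ daq) := by
          rintro ⟨rfl, hd⟩
          exact hc ⟨hd, by omega, by omega⟩
        simp [hx]
    have step := ih (pvAssign daq l p) hi'
    refine Eq.trans (b := if ((i : Int) + 1) ∈ ps ∧ ((i : Int) + 1) ∉ daq then '-'
        else (pvAssign daq l p)[i]'hi') step ?_
    by_cases h1 : ((i : Int) + 1) ∈ ps ∧ ((i : Int) + 1) ∉ daq
    · rw [if_pos h1, if_pos ⟨List.mem_cons_of_mem _ h1.1, h1.2⟩]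
    · rw [if_neg h1]
      refine hget.trans ?_
      by_cases h2 : p = (i : Int) + 1 ∧ p ∉ daq
      · rw [if_pos h2, if_pos ⟨List.mem_cons.mpr (Or.inl h2.1.symm), h2.1 ▸ h2.2⟩]
      · rw [if_neg h2, if_neg ?_]
        rintro ⟨hm, hd⟩
        rcases List.mem_cons.mp hm with he | hm2
        · exact h2 ⟨he.symm, he ▸ hd⟩
        · exact h1 ⟨hm2, hd⟩

-- render, elementwise
lemma pv_render_len (daq good : List Int) (n : Int) (l : List Char) :
    (pvRender daq good n l).length = l.length := by
  induction l generalizing n with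
  | nil => rfl
  | cons c cs ih => simp [pvRender, ih]

lemma pv_render_get (daq good : List Int) (n : Int) (l : List Char) (i : Nat) (hi : i < l.length) :
    (pvRender daq good n l)[i]'(by rw [pv_render_len]; exact hi) =
      if (n + (i : Int) + 1) ∈ good ∧ (n + (i : Int) + 1) ∉ daq then '-' else l[i] := by
  induction l generalizing n i with
  | nil => simp at hi
  | cons c cs ih =>
    cases i with
    | zero => simp [pvRender]
    | succ j =>
      have hj : j < cs.length := by simpa using hi
      have step := ih (n + 1) j hj
      simp only [pvRender, List.getElem_cons_succ]
      refine Eq.trans step ?_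
      have harith : n + 1 + (j : Int) + 1 = n + ((j : Nat) + 1 : Nat) + 1 := by push_cast; ring
      rw [harith]

-- the two pass-2 formulations agree on any char list
lemma pv_render_eq_assign (daq good : List Int) (l : List Char) :
    pvRender daq good 0 l = good.foldl (pvAssign daq) l := by
  apply List.ext_getElem
  · rw [pv_render_len, pv_assign_len]
  · intro i h1 h2
    have hi : i < l.length := by rwa [pv_render_len] at h1
    refine Eq.trans (pv_render_get daq good 0 l i hi) (Eq.trans ?_ (pv_assign_get daq good l i hi).symm)
    norm_num

-- the tail of A's indexed fold (index ≥ 1) is B's map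
lemma pv_tail_fold (daq good : List Int) (rest : List (List String)) (k : Nat) (out : List (List String))
    (hk : 1 ≤ k) (hrest : ∀ row ∈ rest, row.length = 2) :
    (rest.zipIdx k).foldl (fun out rowith =>
      match rowith.1 with
      | [name, seq] =>
        let new_seq : String :=
          if rowith.2 = 0 then seq
          else String.ofList ((seq.toList.foldl (pvInnerA daq good) ((0 : Int), ([] : List Char))).2)
        out ++ [[name, new_seq]]
      | _ => out) out
    = out ++ rest.map (pvTrimRowB daq good) := by
  induction rest generalizing k out with
  | nil => simp
  | cons row rest ih =>
    obtain ⟨name, seq, rfl⟩ : ∃ n s, row = [n, s] := by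
      have h2 := hrest row (List.mem_cons_self)
      match row, h2 with
      | [n, s], _ => exact ⟨n, s, rfl⟩
    have hk0 : k ≠ 0 := by omega
    simp only [List.zipIdx_cons, List.foldl_cons, List.map_cons]
    rw [if_neg hk0, ih (k + 1) _ (by omega) (fun r hr => hrest r (List.mem_cons_of_mem _ hr))]
    rw [pv_fold_A daq good seq.toList 0 []]
    simp [pvTrimRowB, pvRow2?, pv_render_eq_assign]

-- ===== VERDICT (by name: the statement is the Claim_ definition above) =====
theorem trim_a3m_spec : Claim_equal_trim_a3m := by
  intro a3m daq good _hdom hpre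
  unfold Spec_trim_a3m trim_a3m trim_a3m_alt
  match a3m with
  | [] => rfl
  | row0 :: rest =>
    obtain ⟨name0, seq0, rfl⟩ : ∃ n s, row0 = [n, s] := by
      have h2 := hpre row0 (List.mem_cons_self)
      match row0, h2 with
      | [n, s], _ => exact ⟨n, s, rfl⟩
    simp only [List.zipIdx_cons, List.foldl_cons]
    rw [pv_tail_fold daq good rest 1 _ le_rfl (fun r hr => hpre r (List.mem_cons_of_mem _ hr))]
    simp [pvRow2?]
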